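-- pv_equiv track=rewrite | github.com/faria-23/visual-analytics-final-project | services/color_extraction.py | _determine_color_family
-- ===== SOURCE A (Python) =====
-- from typing import List, Dict, Optional, Tuple, Union
--
-- def _determine_color_family(themes: List[str]) -> str:
--     """Determine color family based on psychology themes"""
--     try:
--         if any(theme in ["Earth", "Natural", "Stability"] for theme in themes):
--             return "earth tones"
--         elif any(theme in ["Sky", "Water", "Calmness"] for theme in themes):
--             return "cool tones"
--         elif any(theme in ["Energy", "Warmth", "Sunshine"] for theme in themes):
--             return "warm tones"
--         elif any(theme in ["Royalty", "Luxury", "Mystery"] for theme in themes):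
--             return "sophisticated tones"
--         elif any(theme in ["Nature", "Growth", "Health"] for theme in themes):
--             return "natural tones"
--         else:
--             return "mixed tones"
--     except Exception:
--         return "unclassified"
-- ===== SOURCE B (Python) =====
-- _CATEGORIES = [
--     (["Earth", "Natural", "Stability"], "earth tones"),
--     (["Sky", "Water", "Calmness"], "cool tones"),
--     (["Energy", "Warmth", "Sunshine"], "warm tones"),
--     (["Royalty", "Luxury", "Mystery"], "sophisticated tones"),
--     (["Nature", "Growth", "Health"], "natural tones"),
-- ]
--
-- _INDEX = {kw: (rank, label)
--           for rank, (kws, label) in enumerate(_CATEGORIES)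
--           for kw in kws}
--
-- def _determine_color_family(themes):
--     """Determine color family based on psychology themes"""
--     try:
--         best = None
--         for theme in themes:
--             entry = _INDEX.get(theme)
--             if entry is not None and (best is None or entry[0] < best[0]):
--                 best = entry
--         return best[1] if best is not None else "mixed tones"
--     except Exception:
--         return "unclassified"
-- ===== Notes on version B (the rewrite author's own statement) =====
-- stated objective: faster
-- what changed: Replaces the five category-outer any(...) scans over themes by a keyword->(rank,label) dict built once and a single theme-centric pass keeping the minimum rank.
import Mathlib
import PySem

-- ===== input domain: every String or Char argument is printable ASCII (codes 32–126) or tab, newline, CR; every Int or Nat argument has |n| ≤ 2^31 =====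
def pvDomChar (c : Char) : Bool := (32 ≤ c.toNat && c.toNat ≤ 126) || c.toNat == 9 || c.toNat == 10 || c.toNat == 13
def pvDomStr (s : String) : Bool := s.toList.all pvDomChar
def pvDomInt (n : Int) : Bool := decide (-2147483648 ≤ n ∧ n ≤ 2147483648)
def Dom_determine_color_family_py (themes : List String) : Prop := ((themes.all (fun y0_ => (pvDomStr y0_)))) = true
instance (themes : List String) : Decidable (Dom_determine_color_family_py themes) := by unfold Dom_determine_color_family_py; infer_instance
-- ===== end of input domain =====

-- B replaces A's five category-outer any(...) scans by a keyword->(rank,label) index built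
-- once and a single theme-centric pass keeping the minimum rank (objective: alternative).

-- ===== PORT A =====
def determine_color_family_py (themes : List String) : String :=
  if themes.any (fun theme => ["Earth", "Natural", "Stability"].contains theme) then "earth tones"
  else if themes.any (fun theme => ["Sky", "Water", "Calmness"].contains theme) then "cool tones"
  else if themes.any (fun theme => ["Energy", "Warmth", "Sunshine"].contains theme) then "warm tones"
  else if themes.any (fun theme => ["Royalty", "Luxury", "Mystery"].contains theme) then "sophisticated tones"
  else if themes.any (fun theme => ["Nature", "Growth", "Health"].contains theme) then "natural tones"
  else "mixed tones"

-- ===== PORT B =====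
def pvCategories : List (List String × String) :=
  [ (["Earth", "Natural", "Stability"], "earth tones"),
    (["Sky", "Water", "Calmness"], "cool tones"),
    (["Energy", "Warmth", "Sunshine"], "warm tones"),
    (["Royalty", "Luxury", "Mystery"], "sophisticated tones"),
    (["Nature", "Growth", "Health"], "natural tones") ]

def pvIndex : PySem.Dict String (Int × String) :=
  PySem.Dict.ofList
    ((PySem.List.enumerate pvCategories).flatMap
      (fun p => p.2.1.map (fun kw => (kw, (p.1, p.2.2)))))

/-- loop body of B: fold in one theme, keeping the lowest-rank entry seen -/
def pvStep (best : Option (Int × String)) (theme : String) : Option (Int × String) :=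
  match pvIndex.get? theme with
  | some entry =>
    match best with
    | none => some entry
    | some b => if entry.1 < b.1 then some entry else best
  | none => best

def determine_color_family_py_alt (themes : List String) : String :=
  let best := themes.foldl pvStep (none : Option (Int × String))
  match best with
  | some b => b.2
  | none => "mixed tones"

-- ===== PRECONDITION & SPEC =====
def Spec_determine_color_family_py (themes : List String) (out : String) : Prop := out = determine_color_family_py_alt themes
instance (themes : List String) (out : String) : Decidable (Spec_determine_color_family_py themes out) := by unfold Spec_determine_color_family_py; infer_instance

-- ===== CLAIM (what is proved, stated in full; the proofs are below) =====
def Claim_equal_determine_color_family_py : Prop := ∀ (themes : List String), Dom_determine_color_family_py themes → Spec_determine_color_family_py themes (determine_color_family_py themes)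

-- ===== LEMMAS AND PROOFS =====

/-- rank of a keyword under the category order; 5 = unclassified keyword -/
def pvRank (t : String) : Int :=
  if ["Earth", "Natural", "Stability"].contains t then 0
  else if ["Sky", "Water", "Calmness"].contains t then 1
  else if ["Energy", "Warmth", "Sunshine"].contains t then 2
  else if ["Royalty", "Luxury", "Mystery"].contains t then 3
  else if ["Nature", "Growth", "Health"].contains t then 4
  else 5

def pvLabel (k : Int) : String :=
  if k = 0 then "earth tones"
  else if k = 1 then "cool tones"
  else if k = 2 then "warm tones"
  else if k = 3 then "sophisticated tones"
  else if k = 4 then "natural tones"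
  else "mixed tones"

def pvMinRank (themes : List String) : Int :=
  themes.foldr (fun t m => min (pvRank t) m) 5

def pvCanon (k : Int) : Option (Int × String) :=
  if k < 5 then some (k, pvLabel k) else none

theorem pvMinRank_nil : pvMinRank [] = 5 := rfl

theorem pvMinRank_cons (x : String) (xs : List String) :
    pvMinRank (x :: xs) = min (pvRank x) (pvMinRank xs) := rfl

theorem pvRank_bounds (t : String) : 0 ≤ pvRank t ∧ pvRank t ≤ 5 := by
  unfold pvRank; split_ifs <;> omega

def pvKeywords : List String :=
  ["Earth", "Natural", "Stability", "Sky", "Water", "Calmness",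
   "Energy", "Warmth", "Sunshine", "Royalty", "Luxury", "Mystery",
   "Nature", "Growth", "Health"]

theorem pvIndex_items : pvIndex = PySem.Dict.mk
    [("Earth", (0, "earth tones")), ("Natural", (0, "earth tones")), ("Stability", (0, "earth tones")),
     ("Sky", (1, "cool tones")), ("Water", (1, "cool tones")), ("Calmness", (1, "cool tones")),
     ("Energy", (2, "warm tones")), ("Warmth", (2, "warm tones")), ("Sunshine", (2, "warm tones")),
     ("Royalty", (3, "sophisticated tones")), ("Luxury", (3, "sophisticated tones")), ("Mystery", (3, "sophisticated tones")),
     ("Nature", (4, "natural tones")), ("Growth", (4, "natural tones")), ("Health", (4, "natural tones"))] := by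
  rfl

theorem pvLookup (t : String) :
    pvIndex.get? t = pvCanon (pvRank t) := by
  by_cases hm : t ∈ pvKeywords
  · simp only [pvKeywords, List.mem_cons, List.not_mem_nil, or_false] at hm
    rcases hm with rfl|rfl|rfl|rfl|rfl|rfl|rfl|rfl|rfl|rfl|rfl|rfl|rfl|rfl|rfl <;> decide
  · simp only [pvKeywords, List.mem_cons, List.not_mem_nil, or_false, not_or] at hm
    obtain ⟨h1,h2,h3,h4,h5,h6,h7,h8,h9,h10,h11,h12,h13,h14,h15⟩ := hm
    have hr : pvRank t = 5 := by
      simp [pvRank, List.contains_eq_mem, h1,h2,h3,h4,h5,h6,h7,h8,h9,h10,h11,h12,h13,h14,h15]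
    rw [hr, pvIndex_items]
    simp [pvCanon,
      Ne.symm h1, Ne.symm h2, Ne.symm h3, Ne.symm h4, Ne.symm h5,
      Ne.symm h6, Ne.symm h7, Ne.symm h8, Ne.symm h9, Ne.symm h10,
      Ne.symm h11, Ne.symm h12, Ne.symm h13, Ne.symm h14, Ne.symm h15,
      PySem.Dict.get?]

theorem pvContains_iff_rank (t : String) :
    ((["Earth", "Natural", "Stability"].contains t = true ↔ pvRank t = 0) ∧
     (["Sky", "Water", "Calmness"].contains t = true ↔ pvRank t = 1) ∧
     (["Energy", "Warmth", "Sunshine"].contains t = true ↔ pvRank t = 2) ∧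
     (["Royalty", "Luxury", "Mystery"].contains t = true ↔ pvRank t = 3) ∧
     (["Nature", "Growth", "Health"].contains t = true ↔ pvRank t = 4)) := by
  by_cases hm : t ∈ pvKeywords
  · simp only [pvKeywords, List.mem_cons, List.not_mem_nil, or_false] at hm
    rcases hm with rfl|rfl|rfl|rfl|rfl|rfl|rfl|rfl|rfl|rfl|rfl|rfl|rfl|rfl|rfl <;> decide
  · simp only [pvKeywords, List.mem_cons, List.not_mem_nil, or_false, not_or] at hm
    obtain ⟨h1,h2,h3,h4,h5,h6,h7,h8,h9,h10,h11,h12,h13,h14,h15⟩ := hm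
    simp [pvRank, List.contains_eq_mem, h1,h2,h3,h4,h5,h6,h7,h8,h9,h10,h11,h12,h13,h14,h15]

theorem pvMinRank_le (themes : List String) :
    ∀ t ∈ themes, pvMinRank themes ≤ pvRank t := by
  induction themes with
  | nil => simp
  | cons x xs ih =>
    intro t ht
    rw [pvMinRank_cons]
    rcases List.mem_cons.mp ht with rfl | h
    · exact min_le_left _ _
    · exact le_trans (min_le_right _ _) (ih t h)

theorem pvMinRank_attained (themes : List String) :
    pvMinRank themes = 5 ∨ ∃ t ∈ themes, pvRank t = pvMinRank themes := by
  induction themes with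
  | nil => left; rfl
  | cons x xs ih =>
    rw [pvMinRank_cons]
    rcases le_total (pvRank x) (pvMinRank xs) with h | h
    · right; exact ⟨x, List.mem_cons_self, (min_eq_left h).symm⟩
    · rw [min_eq_right h]
      rcases ih with h5 | ⟨t, ht, hr⟩
      · left; exact h5
      · right; exact ⟨t, List.mem_cons_of_mem _ ht, hr⟩

theorem pvMinRank_le5 (themes : List String) : pvMinRank themes ≤ 5 := by
  induction themes with
  | nil => simp [pvMinRank_nil]
  | cons x xs ih =>
    rw [pvMinRank_cons]
    exact le_trans (min_le_right _ _) ih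

theorem pvMinRank_nonneg (themes : List String) : 0 ≤ pvMinRank themes := by
  induction themes with
  | nil => simp [pvMinRank_nil]
  | cons x xs ih =>
    rw [pvMinRank_cons]
    exact le_min (pvRank_bounds x).1 ih

theorem pvAny_iff (themes : List String) (k : Int) (p : String → Bool)
    (hp : ∀ t, p t = true ↔ pvRank t = k) :
    themes.any p = true ↔ ∃ t ∈ themes, pvRank t = k := by
  simp only [List.any_eq_true]
  constructor
  · rintro ⟨t, ht, hpt⟩; exact ⟨t, ht, (hp t).1 hpt⟩
  · rintro ⟨t, ht, hr⟩; exact ⟨t, ht, (hp t).2 hr⟩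

theorem A_eq_label (themes : List String) :
    determine_color_family_py themes = pvLabel (pvMinRank themes) := by
  unfold determine_color_family_py
  have hle := pvMinRank_le themes
  have hatt := pvMinRank_attained themes
  have h5 := pvMinRank_le5 themes
  have h0 := pvMinRank_nonneg themes
  have e0 := pvAny_iff themes 0 _ (fun t => (pvContains_iff_rank t).1)
  have e1 := pvAny_iff themes 1 _ (fun t => (pvContains_iff_rank t).2.1)
  have e2 := pvAny_iff themes 2 _ (fun t => (pvContains_iff_rank t).2.2.1)
  have e3 := pvAny_iff themes 3 _ (fun t => (pvContains_iff_rank t).2.2.2.1)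
  have e4 := pvAny_iff themes 4 _ (fun t => (pvContains_iff_rank t).2.2.2.2)
  split_ifs with a0 a1 a2 a3 a4
  · obtain ⟨t, ht, hr⟩ := e0.1 a0
    have := hle t ht
    have hm : pvMinRank themes = 0 := by omega
    simp [pvLabel, hm]
  · obtain ⟨t, ht, hr⟩ := e1.1 a1
    have h1 := hle t ht
    have hne0 : ¬ ∃ t ∈ themes, pvRank t = 0 := fun h => a0 (e0.2 h)
    have hm : pvMinRank themes = 1 := by
      rcases hatt with h | ⟨u, hu, hru⟩
      · omega
      · rcases eq_or_ne (pvMinRank themes) 0 with h0' | h0'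
        · exact absurd ⟨u, hu, by omega⟩ hne0
        · omega
    simp [pvLabel, hm]
  · obtain ⟨t, ht, hr⟩ := e2.1 a2
    have h1 := hle t ht
    have hne0 : ¬ ∃ t ∈ themes, pvRank t = 0 := fun h => a0 (e0.2 h)
    have hne1 : ¬ ∃ t ∈ themes, pvRank t = 1 := fun h => a1 (e1.2 h)
    have hm : pvMinRank themes = 2 := by
      rcases hatt with h | ⟨u, hu, hru⟩
      · omega
      · rcases eq_or_ne (pvMinRank themes) 0 with h0' | h0'
        · exact absurd ⟨u, hu, by omega⟩ hne0
        · rcases eq_or_ne (pvMinRank themes) 1 with h1' | h1'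
          · exact absurd ⟨u, hu, by omega⟩ hne1
          · omega
    simp [pvLabel, hm]
  · obtain ⟨t, ht, hr⟩ := e3.1 a3
    have h1 := hle t ht
    have hne0 : ¬ ∃ t ∈ themes, pvRank t = 0 := fun h => a0 (e0.2 h)
    have hne1 : ¬ ∃ t ∈ themes, pvRank t = 1 := fun h => a1 (e1.2 h)
    have hne2 : ¬ ∃ t ∈ themes, pvRank t = 2 := fun h => a2 (e2.2 h)
    have hm : pvMinRank themes = 3 := by
      rcases hatt with h | ⟨u, hu, hru⟩
      · omega
      · rcases eq_or_ne (pvMinRank themes) 0 with h0' | h0'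
        · exact absurd ⟨u, hu, by omega⟩ hne0
        · rcases eq_or_ne (pvMinRank themes) 1 with h1' | h1'
          · exact absurd ⟨u, hu, by omega⟩ hne1
          · rcases eq_or_ne (pvMinRank themes) 2 with h2' | h2'
            · exact absurd ⟨u, hu, by omega⟩ hne2
            · omega
    simp [pvLabel, hm]
  · obtain ⟨t, ht, hr⟩ := e4.1 a4
    have h1 := hle t ht
    have hne0 : ¬ ∃ t ∈ themes, pvRank t = 0 := fun h => a0 (e0.2 h)
    have hne1 : ¬ ∃ t ∈ themes, pvRank t = 1 := fun h => a1 (e1.2 h)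
    have hne2 : ¬ ∃ t ∈ themes, pvRank t = 2 := fun h => a2 (e2.2 h)
    have hne3 : ¬ ∃ t ∈ themes, pvRank t = 3 := fun h => a3 (e3.2 h)
    have hm : pvMinRank themes = 4 := by
      rcases hatt with h | ⟨u, hu, hru⟩
      · omega
      · rcases eq_or_ne (pvMinRank themes) 0 with h0' | h0'
        · exact absurd ⟨u, hu, by omega⟩ hne0
        · rcases eq_or_ne (pvMinRank themes) 1 with h1' | h1'
          · exact absurd ⟨u, hu, by omega⟩ hne1
          · rcases eq_or_ne (pvMinRank themes) 2 with h2' | h2'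
            · exact absurd ⟨u, hu, by omega⟩ hne2
            · rcases eq_or_ne (pvMinRank themes) 3 with h3' | h3'
              · exact absurd ⟨u, hu, by omega⟩ hne3
              · omega
    simp [pvLabel, hm]
  · have hne0 : ¬ ∃ t ∈ themes, pvRank t = 0 := fun h => a0 (e0.2 h)
    have hne1 : ¬ ∃ t ∈ themes, pvRank t = 1 := fun h => a1 (e1.2 h)
    have hne2 : ¬ ∃ t ∈ themes, pvRank t = 2 := fun h => a2 (e2.2 h)
    have hne3 : ¬ ∃ t ∈ themes, pvRank t = 3 := fun h => a3 (e3.2 h)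
    have hne4 : ¬ ∃ t ∈ themes, pvRank t = 4 := fun h => a4 (e4.2 h)
    have hm : pvMinRank themes = 5 := by
      rcases hatt with h | ⟨u, hu, hru⟩
      · exact h
      · have hb := pvRank_bounds u
        have := hle u hu
        have k0 : pvRank u ≠ 0 := fun h => hne0 ⟨u, hu, h⟩
        have k1 : pvRank u ≠ 1 := fun h => hne1 ⟨u, hu, h⟩
        have k2 : pvRank u ≠ 2 := fun h => hne2 ⟨u, hu, h⟩
        have k3 : pvRank u ≠ 3 := fun h => hne3 ⟨u, hu, h⟩
        have k4 : pvRank u ≠ 4 := fun h => hne4 ⟨u, hu, h⟩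
        omega
    simp [pvLabel, hm]

theorem pvStep_canon (k : Int) (x : String) :
    pvStep (pvCanon k) x = pvCanon (min k (pvRank x)) := by
  have hb := pvRank_bounds x
  unfold pvStep
  rw [pvLookup x]
  unfold pvCanon
  by_cases hr : pvRank x < 5
  · rw [if_pos hr]
    by_cases hk : k < 5
    · rw [if_pos hk]
      simp only
      by_cases hlt : pvRank x < k
      · rw [if_pos hlt, if_pos (by omega), min_eq_right hlt.le]
      · rw [if_neg hlt, min_eq_left (by omega), if_pos hk]
    · rw [if_neg hk]
      simp only
      rw [if_pos (by omega), min_eq_right (by omega)]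
  · rw [if_neg hr]
    by_cases hk : k < 5
    · rw [if_pos hk]
      simp only
      rw [min_eq_left (by omega), if_pos hk]
    · rw [if_neg hk, if_neg (by omega)]

theorem B_fold_eq (themes : List String) (k : Int) :
    themes.foldl pvStep (pvCanon k) = pvCanon (min k (pvMinRank themes)) := by
  induction themes generalizing k with
  | nil =>
    rw [List.foldl_nil, pvMinRank_nil]
    by_cases h : k < 5
    · rw [min_eq_left (by omega)]
    · unfold pvCanon
      rw [if_neg h, if_neg (by omega)]
  | cons x xs ih =>
    rw [List.foldl_cons, pvStep_canon, ih, pvMinRank_cons, min_assoc]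

theorem B_eq_label (themes : List String) :
    determine_color_family_py_alt themes = pvLabel (pvMinRank themes) := by
  unfold determine_color_family_py_alt
  have h0 : (none : Option (Int × String)) = pvCanon 5 := by
    unfold pvCanon; rw [if_neg (by omega)]
  simp only
  rw [h0, B_fold_eq themes 5, min_eq_right (pvMinRank_le5 themes)]
  unfold pvCanon
  by_cases h : pvMinRank themes < 5
  · rw [if_pos h]
  · rw [if_neg h]
    have hm := pvMinRank_le5 themes
    have hm5 : pvMinRank themes = 5 := by omega
    simp [pvLabel, hm5]

-- ===== VERDICT (by name: the statement is the Claim_ definition above) =====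
theorem determine_color_family_py_spec : Claim_equal_determine_color_family_py := by
  intro themes _
  unfold Spec_determine_color_family_py
  rw [A_eq_label, B_eq_label]
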